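-- pv_equiv track=rewrite | github.com/alexandredunant/autosearch_HZ | loop_state.py | plateau_count
-- ===== SOURCE A (Python) =====
-- def plateau_count(records: list[dict[str, str]]) -> int:
--     plateau = 0
--     for row in records:
--         if row["status"] == "keep":
--             plateau = 0
--         elif row["status"]:
--             plateau += 1
--     return plateau
-- ===== SOURCE B (Python) =====
-- def plateau_count(records: list[dict[str, str]]) -> int:
--     # Forward pass preserves A's KeyError order; then count the suffix after the last "keep".
--     statuses = [row["status"] for row in records]
--     count = 0
--     for s in reversed(statuses):
--         if s == "keep":
--             break
--         if s:
--             count += 1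
--     return count
-- ===== Notes on version B (the rewrite author's own statement) =====
-- stated objective: alternative
-- what changed: Replaces A's running counter that is reset at every 'keep' by a reverse scan over the extracted statuses that counts non-empty statuses and stops at the first 'keep' from the end.
import Mathlib
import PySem

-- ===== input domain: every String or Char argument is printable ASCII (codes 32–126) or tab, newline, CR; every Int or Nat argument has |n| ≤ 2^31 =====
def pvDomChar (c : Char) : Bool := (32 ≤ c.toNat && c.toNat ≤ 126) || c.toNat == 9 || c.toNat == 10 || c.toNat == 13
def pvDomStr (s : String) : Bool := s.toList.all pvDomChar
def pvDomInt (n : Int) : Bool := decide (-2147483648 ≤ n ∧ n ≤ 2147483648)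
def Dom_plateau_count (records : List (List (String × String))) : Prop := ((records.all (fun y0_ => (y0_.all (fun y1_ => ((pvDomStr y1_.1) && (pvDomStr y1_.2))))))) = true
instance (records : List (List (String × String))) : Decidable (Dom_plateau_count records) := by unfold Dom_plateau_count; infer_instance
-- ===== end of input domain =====

-- B restates A's reset-counter as a reverse scan over the statuses: count non-empty statuses until the first "keep" from the end.

-- ===== PORT A =====
-- row["status"]: first-match association-list lookup; Pre_ guarantees the key exists.
def pvStatus (row : List (String × String)) : String :=
  ((row.find? (fun p => p.1 == "status")).map (·.2)).getD ""

def plateau_count (records : List (List (String × String))) : Int :=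
  records.foldl (fun plateau row =>
    if pvStatus row = "keep" then 0
    else if pvStatus row ≠ "" then plateau + 1 else plateau) 0

-- ===== PORT B =====
-- reverse scan with break at the first "keep"
def pvSuffixCount : List String → Int
  | [] => 0
  | s :: rest => if s = "keep" then 0 else (if s ≠ "" then 1 else 0) + pvSuffixCount rest

def plateau_count_alt (records : List (List (String × String))) : Int :=
  pvSuffixCount ((records.map pvStatus).reverse)

-- ===== PRECONDITION & SPEC =====
-- Pre_ excludes records missing a "status" key, on which Python A raises KeyError.
def Pre_plateau_count (records : List (List (String × String))) : Prop :=
  (records.all (fun row => row.any (fun p => p.1 == "status"))) = true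
instance (records : List (List (String × String))) : Decidable (Pre_plateau_count records) := by
  unfold Pre_plateau_count; infer_instance
def pvWitness_plateau_count : (List (List (String × String))) :=
  [[("status", "keep")], [("status", "run")], [("status", "")]]
def Spec_plateau_count (records : List (List (String × String))) (out : Int) : Prop := out = plateau_count_alt records
instance (records : List (List (String × String))) (out : Int) : Decidable (Spec_plateau_count records out) := by unfold Spec_plateau_count; infer_instance

-- ===== CLAIM (what is proved, stated in full; the proofs are below) =====
def Claim_equal_plateau_count : Prop := ∀ (records : List (List (String × String))), Dom_plateau_count records → Pre_plateau_count records → Spec_plateau_count records (plateau_count records)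

-- ===== LEMMAS AND PROOFS =====
-- Both sides satisfy the same right-recursion F (l ++ [s]) = if s = "keep" then 0 else bonus + F l.
theorem pvSuffixCount_snoc (l : List String) (s : String) :
    pvSuffixCount ((l ++ [s]).reverse)
      = if s = "keep" then 0 else (if s ≠ "" then 1 else 0) + pvSuffixCount l.reverse := by
  simp [pvSuffixCount]

theorem plateau_count_eq_alt (records : List (List (String × String))) :
    plateau_count records = plateau_count_alt records := by
  induction records using List.reverseRecOn with
  | nil => rfl
  | append_singleton l r ih =>
      simp only [plateau_count, plateau_count_alt, List.foldl_append, List.foldl_cons,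
        List.foldl_nil, List.map_append, List.map_cons, List.map_nil,
        pvSuffixCount_snoc] at *
      split_ifs with h1 h2 <;> simp_all <;> omega

-- ===== VERDICT (by name: the statement is the Claim_ definition above) =====
theorem plateau_count_spec : Claim_equal_plateau_count := by
  intro records _ _
  exact plateau_count_eq_alt records
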